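-- pv_equiv track=rewrite | github.com/illumeow/FAI-final | src/players/agents/cfr_plus_player.py | _count_hand_assignments
-- ===== SOURCE A (Python) =====
-- from math import comb
--
-- def _count_hand_assignments(unseen_len: int, n_opponents: int, rounds_left: int) -> int:
--     if unseen_len != n_opponents * rounds_left:
--         return 0
--     total = 1
--     remaining = unseen_len
--     for _ in range(n_opponents):
--         total *= comb(remaining, rounds_left)
--         remaining -= rounds_left
--     return total
-- ===== SOURCE B (Python) =====
-- from math import factorial
--
-- def _count_hand_assignments(unseen_len: int, n_opponents: int, rounds_left: int) -> int:
--     if unseen_len != n_opponents * rounds_left: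
--         return 0
--     if n_opponents <= 0:
--         return 1
--     return factorial(unseen_len) // factorial(rounds_left) ** n_opponents
-- ===== Notes on version B (the rewrite author's own statement) =====
-- stated objective: simpler
-- what changed: Replaces the loop multiplying successive binomial coefficients by the closed-form multinomial coefficient factorial(unseen_len) // factorial(rounds_left) ** n_opponents (with an early return 1 when n_opponents <= 0, where the loop body never runs).
import Mathlib
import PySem

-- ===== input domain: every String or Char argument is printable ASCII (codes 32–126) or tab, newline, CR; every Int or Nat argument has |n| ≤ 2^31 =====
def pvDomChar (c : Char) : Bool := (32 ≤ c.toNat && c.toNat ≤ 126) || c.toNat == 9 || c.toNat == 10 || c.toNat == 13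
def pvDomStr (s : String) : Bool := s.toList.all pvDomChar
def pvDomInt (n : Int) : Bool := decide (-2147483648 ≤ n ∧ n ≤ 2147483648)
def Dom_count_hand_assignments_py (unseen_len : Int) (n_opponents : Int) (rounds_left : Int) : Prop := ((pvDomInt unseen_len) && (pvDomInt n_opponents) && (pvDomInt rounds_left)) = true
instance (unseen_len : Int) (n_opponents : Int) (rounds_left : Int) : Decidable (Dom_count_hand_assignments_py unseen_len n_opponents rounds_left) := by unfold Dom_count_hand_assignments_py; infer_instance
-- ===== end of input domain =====

-- B replaces A's loop multiplying successive binomial coefficients by the closed-form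
-- multinomial coefficient  unseen_len! // (rounds_left!)^n_opponents  (objective: simpler).

-- ===== PORT A =====
-- math.comb(m, k) for m, k ≥ 0 (the only calls Pre_ admits); exact there.
def pyComb (m k : Int) : Int := (Nat.choose m.toNat k.toNat : Int)

def count_hand_assignments_py (unseen_len : Int) (n_opponents : Int) (rounds_left : Int) : Int :=
  if unseen_len ≠ n_opponents * rounds_left then 0
  else
    -- for _ in range(n_opponents): total *= comb(remaining, rounds_left); remaining -= rounds_left
    (((List.range n_opponents.toNat).foldl
        (fun (st : Int × Int) _ => (st.1 * pyComb st.2 rounds_left, st.2 - rounds_left))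
        (1, unseen_len))).1

-- ===== PORT B =====
def count_hand_assignments_py_alt (unseen_len : Int) (n_opponents : Int) (rounds_left : Int) : Int :=
  if unseen_len ≠ n_opponents * rounds_left then 0
  else if n_opponents ≤ 0 then 1
  else PySem.Int.floordiv (unseen_len.toNat.factorial : Int)
        ((rounds_left.toNat.factorial : Int) ^ n_opponents.toNat)

-- ===== PRECONDITION & SPEC =====
-- Pre_ excludes exactly the inputs where A raises (math.comb gets a negative rounds_left:
-- possible only when n_opponents ≥ 1, rounds_left < 0 and the guard passes); A returns on
-- every other input, and B raises on the same excluded inputs.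
def Pre_count_hand_assignments_py (unseen_len : Int) (n_opponents : Int) (rounds_left : Int) : Prop :=
  ¬ (1 ≤ n_opponents ∧ rounds_left < 0 ∧ unseen_len = n_opponents * rounds_left)
instance (unseen_len : Int) (n_opponents : Int) (rounds_left : Int) : Decidable (Pre_count_hand_assignments_py unseen_len n_opponents rounds_left) := by unfold Pre_count_hand_assignments_py; infer_instance

def pvWitness_count_hand_assignments_py : Int × Int × Int := (6, 2, 3)

def Spec_count_hand_assignments_py (unseen_len : Int) (n_opponents : Int) (rounds_left : Int) (out : Int) : Prop := out = count_hand_assignments_py_alt unseen_len n_opponents rounds_left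
instance (unseen_len : Int) (n_opponents : Int) (rounds_left : Int) (out : Int) : Decidable (Spec_count_hand_assignments_py unseen_len n_opponents rounds_left out) := by unfold Spec_count_hand_assignments_py; infer_instance

-- ===== CLAIM (what is proved, stated in full; the proofs are below) =====
def Claim_equal_count_hand_assignments_py : Prop := ∀ (unseen_len : Int) (n_opponents : Int) (rounds_left : Int), Dom_count_hand_assignments_py unseen_len n_opponents rounds_left → Pre_count_hand_assignments_py unseen_len n_opponents rounds_left → Spec_count_hand_assignments_py unseen_len n_opponents rounds_left (count_hand_assignments_py unseen_len n_opponents rounds_left)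

-- ===== LEMMAS AND PROOFS =====

-- the product A's loop accumulates, peeling the first factor
def natProd : Nat → Nat → Nat
  | 0, _ => 1
  | N + 1, R => ((N + 1) * R).choose R * natProd N R

lemma fold_spec (R : Nat) : ∀ (l : List Nat) (t : Int),
    ((l.foldl (fun (st : Int × Int) _ => (st.1 * pyComb st.2 (R : Int), st.2 - (R : Int)))
      (t, ((l.length * R : Nat) : Int)))).1 = t * (natProd l.length R : Int) := by
  intro l
  induction l with
  | nil => intro t; simp [natProd]
  | cons a l ih =>
    intro t
    have h2 : ((((a :: l).length * R : Nat) : Int) - (R : Int)) = ((l.length * R : Nat) : Int) := by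
      push_cast [List.length_cons]; ring
    have h1 : pyComb (((a :: l).length * R : Nat) : Int) ((R : Nat) : Int)
        = (((a :: l).length * R).choose R : Int) := by
      simp only [pyComb, Int.toNat_natCast]
    simp only [List.foldl_cons, h2, h1, ih]
    simp only [List.length_cons, natProd]
    push_cast; ring

lemma natProd_mul_pow (R : Nat) : ∀ N : Nat, natProd N R * R.factorial ^ N = (N * R).factorial := by
  intro N
  induction N with
  | zero => simp [natProd]
  | succ N ih =>
    have hle : R ≤ (N + 1) * R := by nlinarith
    have key := Nat.choose_mul_factorial_mul_factorial hle
    have hsub : (N + 1) * R - R = N * R := by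
      have : (N + 1) * R = N * R + R := by ring
      omega
    rw [hsub] at key
    calc natProd (N + 1) R * R.factorial ^ (N + 1)
        = ((N + 1) * R).choose R * R.factorial * (natProd N R * R.factorial ^ N) := by
          simp [natProd]; ring
      _ = ((N + 1) * R).choose R * R.factorial * (N * R).factorial := by rw [ih]
      _ = ((N + 1) * R).factorial := key

-- ===== VERDICT (by name: the statement is the Claim_ definition above) =====
theorem count_hand_assignments_py_spec : Claim_equal_count_hand_assignments_py := by
  intro u n r _ hpre
  unfold Spec_count_hand_assignments_py count_hand_assignments_py count_hand_assignments_py_alt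
  by_cases hg : u ≠ n * r
  · simp [hg]
  · rw [not_ne_iff] at hg
    simp only [hg, ne_eq, not_true_eq_false, if_false]
    by_cases hn : n ≤ 0
    · have : n.toNat = 0 := by omega
      simp [this, hn]
    · replace hn : 0 < n := by omega
      have hr : 0 ≤ r := by
        by_contra hr
        exact hpre ⟨by omega, by omega, hg⟩
      simp only [if_neg (by omega : ¬ n ≤ 0)]
      set N := n.toNat with hN
      set R := r.toNat with hR
      have hrr : (R : Int) = r := Int.toNat_of_nonneg hr
      have hu : n * r = ((N * R : Nat) : Int) := by
        push_cast; rw [hrr]; congr 1; omega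
      have hlen : (List.range N).length = N := List.length_range ..
      have hfold := fold_spec R (List.range N) 1
      rw [hlen] at hfold
      rw [hu, ← hrr, hfold, one_mul]
      -- B's side: exact division
      rw [Int.toNat_natCast, ← natProd_mul_pow R N]
      rw [show ((natProd N R * R.factorial ^ N : Nat) : Int)
            = ((natProd N R : Nat) : Int) * ((R.factorial ^ N : Nat) : Int) by push_cast; ring]
      rw [show ((R.factorial : Int) ^ N) = ((R.factorial ^ N : Nat) : Int) by push_cast; ring]
      have hpos : (0 : Int) < ((R.factorial ^ N : Nat) : Int) := by
        exact_mod_cast Nat.pos_of_ne_zero (by positivity)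
      rw [PySem.Int.floordiv_eq_ediv_of_pos hpos, Int.mul_ediv_cancel _ (by omega)]
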